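-- pv_equiv track=rewrite | github.com/codewitch-honey-crisis/www_fs | clasptree.py | fsmWidthBytes
-- ===== SOURCE A (Python) =====
-- def fsmWidthBytes(table):
--     width = 1
--     i = 0
--     while i < len(table):
--         entry = table[i]
--         if entry > 32767 or entry < -32768:
--             return 4
--         elif entry > 127 or entry < -128:
--             width = 2
--         i += 1
--     return width
-- ===== SOURCE B (Python) =====
-- def fsmWidthBytes(table):
--     if not table:
--         return 1
--     hi = max(table)
--     lo = min(table)
--     if hi > 32767 or lo < -32768:
--         return 4
--     if hi > 127 or lo < -128:
--         return 2
--     return 1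
-- ===== Notes on version B (the rewrite author's own statement) =====
-- stated objective: simpler
-- what changed: Replaced the per-element stateful scan with early return by two aggregating passes (max and min) followed by a single three-way classification of the extremes.
import Mathlib
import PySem

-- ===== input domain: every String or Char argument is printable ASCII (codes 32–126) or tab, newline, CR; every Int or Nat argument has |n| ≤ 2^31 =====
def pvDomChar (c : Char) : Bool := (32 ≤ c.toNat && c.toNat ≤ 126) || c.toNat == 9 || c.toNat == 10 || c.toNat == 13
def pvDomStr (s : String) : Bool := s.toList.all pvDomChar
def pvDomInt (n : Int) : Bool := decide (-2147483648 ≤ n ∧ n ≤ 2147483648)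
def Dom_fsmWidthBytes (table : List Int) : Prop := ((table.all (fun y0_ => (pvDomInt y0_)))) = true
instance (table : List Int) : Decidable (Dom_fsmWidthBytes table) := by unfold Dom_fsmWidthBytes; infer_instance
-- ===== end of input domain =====

-- B replaces A's stateful early-return scan by max/min aggregation then one classification (objective: simpler).

-- ===== PORT A =====
-- A's while-loop over indices with a running `width` and early return 4.
def fsmWidthBytesLoop : List Int → Int → Int
  | [], width => width
  | entry :: rest, width =>
    if entry > 32767 ∨ entry < -32768 then 4
    else if entry > 127 ∨ entry < -128 then fsmWidthBytesLoop rest 2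
    else fsmWidthBytesLoop rest width

def fsmWidthBytes (table : List Int) : Int := fsmWidthBytesLoop table 1

-- ===== PORT B =====
def fsmWidthBytes_alt (table : List Int) : Int :=
  match table with
  | [] => 1
  | x :: xs =>
    let hi := xs.foldl max x
    let lo := xs.foldl min x
    if hi > 32767 ∨ lo < -32768 then 4
    else if hi > 127 ∨ lo < -128 then 2
    else 1

-- ===== PRECONDITION & SPEC =====
def Spec_fsmWidthBytes (table : List Int) (out : Int) : Prop := out = fsmWidthBytes_alt table
instance (table : List Int) (out : Int) : Decidable (Spec_fsmWidthBytes table out) := by unfold Spec_fsmWidthBytes; infer_instance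

-- ===== CLAIM (what is proved, stated in full; the proofs are below) =====
def Claim_equal_fsmWidthBytes : Prop := ∀ (table : List Int), Dom_fsmWidthBytes table → Spec_fsmWidthBytes table (fsmWidthBytes table)

-- ===== LEMMAS AND PROOFS =====

-- A's loop result characterised by existence of out-of-range entries.
theorem fsmWidthBytesLoop_char (t : List Int) (w : Int) :
    fsmWidthBytesLoop t w =
      if ∃ e ∈ t, e > 32767 ∨ e < -32768 then 4
      else if ∃ e ∈ t, e > 127 ∨ e < -128 then 2
      else w := by
  induction t generalizing w with
  | nil => simp [fsmWidthBytesLoop]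
  | cons x xs ih =>
    simp only [fsmWidthBytesLoop, List.mem_cons, exists_eq_or_imp]
    by_cases h1 : x > 32767 ∨ x < -32768
    · simp [h1]
    · by_cases h2 : x > 127 ∨ x < -128
      · simp [h1, h2, ih]
      · simp [h1, h2, ih]

theorem foldl_max_gt (xs : List Int) (x c : Int) :
    xs.foldl max x > c ↔ (x > c ∨ ∃ e ∈ xs, e > c) := by
  induction xs generalizing x with
  | nil => simp
  | cons y ys ih =>
    simp only [List.foldl_cons, ih, List.mem_cons, exists_eq_or_imp]
    constructor
    · rintro (h | h)
      · rcases lt_max_iff.mp h with hx | hy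
        · exact Or.inl hx
        · exact Or.inr (Or.inl hy)
      · exact Or.inr (Or.inr h)
    · rintro (h | h | h)
      · exact Or.inl (lt_max_of_lt_left h)
      · exact Or.inl (lt_max_of_lt_right h)
      · exact Or.inr h

theorem foldl_min_lt (xs : List Int) (x c : Int) :
    xs.foldl min x < c ↔ (x < c ∨ ∃ e ∈ xs, e < c) := by
  induction xs generalizing x with
  | nil => simp
  | cons y ys ih =>
    simp only [List.foldl_cons, ih, List.mem_cons, exists_eq_or_imp]
    constructor
    · rintro (h | h)
      · rcases min_lt_iff.mp h with hx | hy
        · exact Or.inl hx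
        · exact Or.inr (Or.inl hy)
      · exact Or.inr (Or.inr h)
    · rintro (h | h | h)
      · exact Or.inl (min_lt_of_left_lt h)
      · exact Or.inl (min_lt_of_right_lt h)
      · exact Or.inr h

-- ===== VERDICT (by name: the statement is the Claim_ definition above) =====
theorem fsmWidthBytes_spec : Claim_equal_fsmWidthBytes := by
  intro table _
  unfold Spec_fsmWidthBytes fsmWidthBytes fsmWidthBytes_alt
  rw [fsmWidthBytesLoop_char]
  match table with
  | [] => simp
  | x :: xs =>
    simp only [List.mem_cons, exists_eq_or_imp, foldl_max_gt, foldl_min_lt]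
    have hsplit : ∀ (a b : Int), ((x > a ∨ ∃ e ∈ xs, e > a) ∨ x < b ∨ ∃ e ∈ xs, e < b) ↔
        ((x > a ∨ x < b) ∨ ∃ e ∈ xs, e > a ∨ e < b) := by
      intro a b
      constructor
      · rintro ((h | ⟨e, he, hp⟩) | h | ⟨e, he, hp⟩)
        · exact Or.inl (Or.inl h)
        · exact Or.inr ⟨e, he, Or.inl hp⟩
        · exact Or.inl (Or.inr h)
        · exact Or.inr ⟨e, he, Or.inr hp⟩
      · rintro ((h | h) | ⟨e, he, hp | hp⟩)
        · exact Or.inl (Or.inl h)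
        · exact Or.inr (Or.inl h)
        · exact Or.inl (Or.inr ⟨e, he, hp⟩)
        · exact Or.inr (Or.inr ⟨e, he, hp⟩)
    simp only [← hsplit]
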